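-- pv_equiv track=rewrite | github.com/sanketpandia/ExperimentBot | pilot_academy.py | get_instructor
-- ===== SOURCE A (Python) =====
-- def get_instructor(instructor, pilots_array):
--     instructors = []
--     for pilot in pilots_array:
--         if ("Flight Instructor" in pilot.keys()) and (pilot["Flight Instructor"] not in instructors) and ("NOT ACTIVE" not in pilot["Flight Instructor"]):
--             instructors.append(pilot["Flight Instructor"])
--     for person in instructors:
--         if instructor.upper() in person.upper():
--             return person
--     return ""
-- ===== SOURCE B (Python) =====
-- def get_instructor(instructor, pilots_array):
--     needle = instructor.upper()
--     for pilot in pilots_array: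
--         person = pilot.get("Flight Instructor")
--         if person is not None and "NOT ACTIVE" not in person and needle in person.upper():
--             return person
--     return ""
-- ===== Notes on version B (the rewrite author's own statement) =====
-- stated objective: simpler
-- what changed: B drops A's build-a-deduplicated-instructor-list-then-scan structure and does one streaming pass over pilots_array, returning the first active instructor whose uppercase contains instructor.upper(); dedup never changes which match comes first.
import Mathlib
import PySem

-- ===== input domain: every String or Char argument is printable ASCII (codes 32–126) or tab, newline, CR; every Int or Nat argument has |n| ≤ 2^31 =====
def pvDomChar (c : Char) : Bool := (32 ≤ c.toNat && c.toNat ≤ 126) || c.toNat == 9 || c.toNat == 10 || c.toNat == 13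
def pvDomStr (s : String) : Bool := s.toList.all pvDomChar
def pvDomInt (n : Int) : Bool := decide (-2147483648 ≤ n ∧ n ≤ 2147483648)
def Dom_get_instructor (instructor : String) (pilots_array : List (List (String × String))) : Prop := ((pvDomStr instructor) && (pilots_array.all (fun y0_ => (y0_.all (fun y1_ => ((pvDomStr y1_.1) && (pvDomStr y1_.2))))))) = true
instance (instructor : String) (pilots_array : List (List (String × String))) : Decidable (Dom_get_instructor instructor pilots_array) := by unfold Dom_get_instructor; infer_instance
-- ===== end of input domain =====

-- B replaces A's build-a-deduplicated-list-then-scan with a single streaming pass (simpler; dedup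
-- never changes which match is first).

-- shared dict-lookup primitive: pilot["Flight Instructor"] / .get("Flight Instructor")
def getFI (pilot : List (String × String)) : Option String :=
  (PySem.Dict.ofList pilot).get? "Flight Instructor"

-- ===== PORT A =====
-- first loop of A: build the deduplicated list of active instructors
def buildInstructors (pilots_array : List (List (String × String))) : List String :=
  pilots_array.foldl (fun ins pilot =>
    match getFI pilot with
    | some v =>
        if !ins.contains v && !PySem.Str.isIn "NOT ACTIVE" v then ins ++ [v] else ins
    | none => ins) []

-- second loop of A: first person whose upper-case contains instructor.upper(), else ""
def firstMatch (instructor : String) : List String → String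
  | [] => ""
  | person :: rest =>
      if PySem.Str.isIn (PySem.Str.upper instructor) (PySem.Str.upper person) then person
      else firstMatch instructor rest

def get_instructor (instructor : String) (pilots_array : List (List (String × String))) : String :=
  firstMatch instructor (buildInstructors pilots_array)

-- ===== PORT B =====
def get_instructor_alt (instructor : String) (pilots_array : List (List (String × String))) : String :=
  match pilots_array with
  | [] => ""
  | pilot :: rest =>
      match getFI pilot with
      | some person =>
          if !PySem.Str.isIn "NOT ACTIVE" person &&
             PySem.Str.isIn (PySem.Str.upper instructor) (PySem.Str.upper person) then person
          else get_instructor_alt instructor rest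
      | none => get_instructor_alt instructor rest

-- ===== PRECONDITION & SPEC =====
def Spec_get_instructor (instructor : String) (pilots_array : List (List (String × String))) (out : String) : Prop := out = get_instructor_alt instructor pilots_array
instance (instructor : String) (pilots_array : List (List (String × String))) (out : String) : Decidable (Spec_get_instructor instructor pilots_array out) := by unfold Spec_get_instructor; infer_instance

-- ===== CLAIM (what is proved, stated in full; the proofs are below) =====
def Claim_equal_get_instructor : Prop := ∀ (instructor : String) (pilots_array : List (List (String × String))), Dom_get_instructor instructor pilots_array → Spec_get_instructor instructor pilots_array (get_instructor instructor pilots_array)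

-- ===== LEMMAS AND PROOFS =====

-- abbreviation for A's match condition
def condI (instructor person : String) : Bool :=
  PySem.Str.isIn (PySem.Str.upper instructor) (PySem.Str.upper person)

-- A's step function of the first loop
def stepA (ins : List String) (pilot : List (String × String)) : List String :=
  match getFI pilot with
  | some v => if !ins.contains v && !PySem.Str.isIn "NOT ACTIVE" v then ins ++ [v] else ins
  | none => ins

theorem buildInstructors_eq_foldl (pilots_array : List (List (String × String))) :
    buildInstructors pilots_array = pilots_array.foldl stepA [] := rfl

theorem stepA_none (acc : List String) (pilot : List (String × String))
    (h : getFI pilot = none) : stepA acc pilot = acc := by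
  unfold stepA; rw [h]

theorem stepA_some (acc : List String) (pilot : List (String × String)) (v : String)
    (h : getFI pilot = some v) :
    stepA acc pilot =
      if !acc.contains v && !PySem.Str.isIn "NOT ACTIVE" v then acc ++ [v] else acc := by
  unfold stepA; rw [h]

theorem alt_nil (instructor : String) : get_instructor_alt instructor [] = "" := rfl

theorem alt_cons_none (instructor : String) (pilot : List (String × String))
    (rest : List (List (String × String))) (h : getFI pilot = none) :
    get_instructor_alt instructor (pilot :: rest) = get_instructor_alt instructor rest := by
  conv_lhs => rw [get_instructor_alt]
  rw [h]

theorem alt_cons_some (instructor : String) (pilot : List (String × String))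
    (rest : List (List (String × String))) (v : String) (h : getFI pilot = some v) :
    get_instructor_alt instructor (pilot :: rest) =
      if !PySem.Str.isIn "NOT ACTIVE" v && condI instructor v then v
      else get_instructor_alt instructor rest := by
  conv_lhs => rw [get_instructor_alt]
  rw [h, condI]

theorem firstMatch_cons (instructor p : String) (rest : List String) :
    firstMatch instructor (p :: rest) =
      if condI instructor p then p else firstMatch instructor rest := rfl

-- the fold only ever appends to its accumulator
theorem foldl_stepA_append (ps : List (List (String × String))) (acc : List String) :
    ∃ t, ps.foldl stepA acc = acc ++ t := by
  induction ps generalizing acc with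
  | nil => exact ⟨[], by simp⟩
  | cons p rest ih =>
      simp only [List.foldl_cons]
      rcases ih (stepA acc p) with ⟨t, ht⟩
      rw [ht]
      cases h : getFI p with
      | none => rw [stepA_none acc p h]; exact ⟨t, rfl⟩
      | some v =>
          rw [stepA_some acc p v h]
          by_cases hc : (!acc.contains v && !PySem.Str.isIn "NOT ACTIVE" v) = true
          · rw [if_pos hc, List.append_assoc]; exact ⟨[v] ++ t, rfl⟩
          · rw [if_neg hc]; exact ⟨t, rfl⟩

theorem firstMatch_of_no_match (instructor : String) (l : List String)
    (h : ∀ w ∈ l, condI instructor w = false) : firstMatch instructor l = "" := by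
  induction l with
  | nil => rfl
  | cons p rest ih =>
      rw [firstMatch_cons, if_neg (by rw [h p (by simp)]; exact Bool.false_ne_true)]
      exact ih (fun w hw => h w (by simp [hw]))

theorem firstMatch_append (instructor v : String) (l1 t : List String)
    (h1 : ∀ w ∈ l1, condI instructor w = false) (hv : condI instructor v = true) :
    firstMatch instructor (l1 ++ v :: t) = v := by
  induction l1 with
  | nil => rw [List.nil_append, firstMatch_cons, if_pos hv]
  | cons p rest ih =>
      rw [List.cons_append, firstMatch_cons,
        if_neg (by rw [h1 p (by simp)]; exact Bool.false_ne_true)]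
      exact ih (fun w hw => h1 w (by simp [hw]))

-- main invariant: with an accumulator containing no match, A's two phases compute B's scan
theorem main_inv (instructor : String) (ps : List (List (String × String))) (acc : List String)
    (hacc : ∀ w ∈ acc, condI instructor w = false) :
    firstMatch instructor (ps.foldl stepA acc) = get_instructor_alt instructor ps := by
  induction ps generalizing acc with
  | nil =>
      rw [List.foldl_nil, alt_nil]
      exact firstMatch_of_no_match instructor acc hacc
  | cons pilot rest ih =>
      rw [List.foldl_cons]
      cases h : getFI pilot with
      | none =>
          rw [stepA_none acc pilot h, alt_cons_none instructor pilot rest h]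
          exact ih acc hacc
      | some v =>
          rw [alt_cons_some instructor pilot rest v h, stepA_some acc pilot v h]
          by_cases hna : PySem.Str.isIn "NOT ACTIVE" v = true
          · -- inactive: both sides skip
            rw [hna]
            simp only [Bool.not_true, Bool.and_false, Bool.false_and, Bool.false_eq_true,
              if_false]
            exact ih acc hacc
          · rw [Bool.not_eq_true] at hna
            rw [hna]
            by_cases hc : condI instructor v = true
            · -- B returns v here; v cannot already be in acc (nothing in acc matches)
              have hvnot : acc.contains v = false := by
                by_contra hmem
                rw [Bool.not_eq_false, List.contains_iff_mem] at hmem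
                rw [hacc v hmem] at hc; exact Bool.false_ne_true hc
              rw [hvnot, hc]
              simp only [Bool.not_false, Bool.and_self, if_true]
              rcases foldl_stepA_append rest (acc ++ [v]) with ⟨t, ht⟩
              rw [ht, List.append_assoc, List.singleton_append]
              exact firstMatch_append instructor v acc t hacc hc
            · -- no match: B skips; A's accumulator may gain v, invariant still holds
              rw [Bool.not_eq_true] at hc
              rw [hc]
              simp only [Bool.not_false, Bool.and_false, Bool.false_eq_true, if_false]
              by_cases hmem : acc.contains v = true
              · rw [hmem]
                simp only [Bool.not_true, Bool.false_and, Bool.false_eq_true, if_false]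
                exact ih acc hacc
              · rw [Bool.not_eq_true] at hmem
                rw [hmem]
                simp only [Bool.not_false, Bool.true_and, if_true]
                refine ih (acc ++ [v]) ?_
                intro w hw
                rcases List.mem_append.mp hw with hw1 | hw2
                · exact hacc w hw1
                · rw [List.mem_singleton.mp hw2]; exact hc

-- ===== VERDICT (by name: the statement is the Claim_ definition above) =====
theorem get_instructor_spec : Claim_equal_get_instructor := by
  intro instructor pilots_array _
  unfold Spec_get_instructor get_instructor
  rw [buildInstructors_eq_foldl]
  exact main_inv instructor pilots_array [] (by intro w hw; cases hw)
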